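-- pv_equiv track=rewrite | github.com/lawliet022/algorithms | OTHERS/foobar/p3.py | xorTill
-- ===== SOURCE A (Python) =====
-- def xorTill(n):
--     if n <= 0:
--         return 0
--     if int((n+1)/2)&1:
--         ans = 1
--     else:
--         ans = 0
--     n += 1
--     for i in range(1,32):
--         p = n % (1<<(i+1))
--         p -= (1<<i)
--         if p > 0 and (p&1):
--             ans = ans | (1<<i)
--
--     return ans
-- ===== SOURCE B (Python) =====
-- def xorTill(n):
--     if n <= 0:
--         return 0
--     r = n % 4
--     if r == 0:
--         return n
--     if r == 1:
--         return 1
--     if r == 2: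
--         return n + 1
--     return 0
-- ===== Notes on version B (the rewrite author's own statement) =====
-- stated objective: simpler
-- what changed: Replaces the per-bit loop over 31 bit positions (plus the separate bit-0 parity precomputation) with the closed-form value of XOR(0..n) selected by the residue of n modulo 4, keeping the guard returning 0 for nonpositive n.
import Mathlib
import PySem

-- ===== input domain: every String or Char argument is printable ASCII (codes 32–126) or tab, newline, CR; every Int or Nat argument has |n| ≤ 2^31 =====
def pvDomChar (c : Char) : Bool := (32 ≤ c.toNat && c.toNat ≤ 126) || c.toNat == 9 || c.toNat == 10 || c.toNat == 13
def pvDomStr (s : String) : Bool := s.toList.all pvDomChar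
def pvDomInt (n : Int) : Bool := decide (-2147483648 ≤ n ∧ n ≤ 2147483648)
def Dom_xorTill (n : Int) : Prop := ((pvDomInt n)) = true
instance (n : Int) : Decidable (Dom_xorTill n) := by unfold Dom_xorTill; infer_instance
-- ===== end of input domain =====

-- B replaces A's 31-iteration per-bit loop with the closed-form value of XOR(0..n) chosen by n % 4 (simpler; same n <= 0 guard).

-- ===== PORT A =====
def xorTill (n : Int) : Int :=
  if n ≤ 0 then 0
  else
    -- int((n+1)/2) is CPython float true division followed by int() truncation; exact
    -- (= truncating integer division) for the |n| ≤ 2^31 inputs of Dom_xorTill.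
    let ans : Int := if PySem.Int.band (PySem.Int.truncdiv (n + 1) 2) 1 ≠ 0 then 1 else 0
    let m := n + 1
    (PySem.List.pyRange 1 32 1).foldl
      (fun ans i =>
        let p := PySem.Int.mod m ((1 : Int) <<< (i + 1).toNat) - (1 : Int) <<< i.toNat
        if p > 0 ∧ PySem.Int.band p 1 ≠ 0 then PySem.Int.bor ans ((1 : Int) <<< i.toNat)
        else ans)
      ans

-- ===== PORT B =====
def xorTill_alt (n : Int) : Int :=
  if n ≤ 0 then 0
  else
    let r := PySem.Int.mod n 4
    if r = 0 then n
    else if r = 1 then 1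
    else if r = 2 then n + 1
    else 0

-- ===== PRECONDITION & SPEC =====
def Spec_xorTill (n : Int) (out : Int) : Prop := out = xorTill_alt n
instance (n : Int) (out : Int) : Decidable (Spec_xorTill n out) := by unfold Spec_xorTill; infer_instance

-- ===== CLAIM (what is proved, stated in full; the proofs are below) =====
def Claim_equal_xorTill : Prop := ∀ (n : Int), Dom_xorTill n → Spec_xorTill n (xorTill n)

-- ===== LEMMAS AND PROOFS =====

-- A's loop body, named so the invariant lemmas can talk about it.
def stepA (m : Int) : Int → Int → Int :=
  fun ans i =>
    let p := PySem.Int.mod m ((1 : Int) <<< (i + 1).toNat) - (1 : Int) <<< i.toNat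
    if p > 0 ∧ PySem.Int.band p 1 ≠ 0 then PySem.Int.bor ans ((1 : Int) <<< i.toNat)
    else ans

lemma shl_one (s : Nat) : (1 : Int) <<< s = 2 ^ s := by
  rw [Int.shiftLeft_eq]; ring

lemma nat_lor_two_pow (x s : Nat) (h : x < 2 ^ s) : x ||| 2 ^ s = x + 2 ^ s := by
  have h1 := Nat.two_pow_add_eq_or_of_lt h 1
  rw [Nat.mul_one] at h1
  rw [Nat.lor_comm, ← h1]
  omega

lemma bor_two_pow (a : Int) (s : Nat) (h0 : 0 ≤ a) (h : a < 2 ^ s) :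
    PySem.Int.bor a (2 ^ s) = a + 2 ^ s := by
  have hp : ((2 ^ s : Nat) : Int) = (2 : Int) ^ s := by push_cast; ring
  have hlt : a.toNat < 2 ^ s := by
    have : (a.toNat : Int) < ((2 ^ s : Nat) : Int) := by rw [hp]; omega
    exact_mod_cast this
  have ha : a = ((a.toNat : Nat) : Int) := (Int.toNat_of_nonneg h0).symm
  rw [ha, ← hp, PySem.Int.bor_natCast, nat_lor_two_pow _ _ hlt]
  push_cast; ring

-- unfold the body at i = 1 + k (k : Nat)
lemma stepA_eval (m a : Int) (k : Nat) :
    stepA m a (1 + (k : Int)) =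
      (if m % 2 ^ (k + 2) - 2 ^ (k + 1) > 0 ∧ (m % 2 ^ (k + 2) - 2 ^ (k + 1)) % 2 ≠ 0
       then PySem.Int.bor a (2 ^ (k + 1)) else a) := by
  have h1 : ((1 : Int) + k).toNat = k + 1 := by omega
  have h2 : ((1 : Int) + k + 1).toNat = k + 2 := by omega
  have hT : (0 : Int) < 2 ^ (k + 2) := by positivity
  simp only [stepA, h1, h2, shl_one,
    PySem.Int.mod_eq_emod_of_pos hT, PySem.Int.band_one,
    PySem.Int.mod_eq_emod_of_pos (by norm_num : (0:Int) < 2)]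

lemma fold_even (m a0 : Int) (hm : m % 2 = 0) :
    ∀ k : Nat, (PySem.List.pyRange 1 (1 + (k : Int)) 1).foldl (stepA m) a0 = a0 := by
  intro k
  induction k with
  | zero =>
    rw [show (1 + ((0 : Nat) : Int)) = 1 by norm_num,
      PySem.List.pyRange_one_eq_nil le_rfl]
    rfl
  | succ k ih =>
    have hb : (1 : Int) ≤ 1 + (k : Int) := by omega
    have hcast : (1 + ((k + 1 : Nat) : Int)) = (1 + (k : Int)) + 1 := by push_cast; ring
    rw [hcast, PySem.List.pyRange_one_succ_right hb, List.foldl_append, ih]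
    simp only [List.foldl_cons, List.foldl_nil, stepA_eval]
    have hq2 : m % 2 ^ (k + 2) % 2 = m % 2 :=
      Int.emod_emod_of_dvd m (dvd_pow_self 2 (by omega))
    have hS2 : ((2 : Int) ^ (k + 1)) % 2 = 0 :=
      Int.emod_eq_zero_of_dvd (dvd_pow_self 2 (by omega))
    have hp2 : (m % 2 ^ (k + 2) - 2 ^ (k + 1)) % 2 = 0 := by
      rw [Int.sub_emod, hq2, hS2, hm]; norm_num
    rw [if_neg (fun h => h.2 hp2)]

lemma fold_odd (m a0 : Int) (hm : m % 2 = 1) (h0 : 0 ≤ a0) (h1 : a0 ≤ 1) :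
    ∀ k : Nat, (PySem.List.pyRange 1 (1 + (k : Int)) 1).foldl (stepA m) a0
      = a0 + m % 2 ^ (k + 1) - 1 := by
  intro k
  induction k with
  | zero =>
    rw [show (1 + ((0 : Nat) : Int)) = 1 by norm_num,
      PySem.List.pyRange_one_eq_nil le_rfl]
    simp [pow_one, hm]
  | succ k ih =>
    have hb : (1 : Int) ≤ 1 + (k : Int) := by omega
    have hcast : (1 + ((k + 1 : Nat) : Int)) = (1 + (k : Int)) + 1 := by push_cast; ring
    rw [hcast, PySem.List.pyRange_one_succ_right hb, List.foldl_append, ih]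
    simp only [List.foldl_cons, List.foldl_nil, stepA_eval]
    set S : Int := 2 ^ (k + 1) with hSdef
    set T : Int := 2 ^ (k + 2) with hTdef
    have hT0 : (0 : Int) < T := by positivity
    have hS0 : (0 : Int) < S := by positivity
    set q : Int := m % T with hqdef
    have hq0 : 0 ≤ q := Int.emod_nonneg m (by omega)
    have hqT : q < T := Int.emod_lt_of_pos m hT0
    have hST : S ∣ T := pow_dvd_pow 2 (by omega)
    have hqS : q % S = m % S := Int.emod_emod_of_dvd m hST
    have hq2 : q % 2 = 1 := by
      rw [hqdef, Int.emod_emod_of_dvd m (dvd_pow_self 2 (by omega)), hm]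
    have hmS0 : 0 ≤ m % S := Int.emod_nonneg m (by omega)
    have hmSS : m % S < S := Int.emod_lt_of_pos m hS0
    have hmS2 : m % S % 2 = 1 := by
      rw [Int.emod_emod_of_dvd m (dvd_pow_self 2 (by omega)), hm]
    have hmS1 : 1 ≤ m % S := by omega
    have hTS : T = 2 * S := by rw [hTdef, hSdef]; ring
    by_cases hc : q < S
    · -- bit not set: p < 0
      have hq : q = m % S := by
        rw [← hqS]; exact (Int.emod_eq_of_lt hq0 hc).symm
      have hneg : ¬ (q - S > 0 ∧ (q - S) % 2 ≠ 0) := by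
        intro h; omega
      rw [if_neg hneg]
      omega
    · -- bit set: p = m % S ≥ 1, odd
      have hp : q - S = m % S := by
        have h1' : (q - S) % S = q % S := Int.sub_emod_right q S
        have h2' : (q - S) % S = q - S := Int.emod_eq_of_lt (by omega) (by omega)
        omega
      have hpos : q - S > 0 ∧ (q - S) % 2 ≠ 0 := by
        refine ⟨by omega, ?_⟩
        rw [hp]; omega
      rw [if_pos hpos]
      have hprev0 : 0 ≤ a0 + m % S - 1 := by omega
      have hprevS : a0 + m % S - 1 < S := by omega
      rw [bor_two_pow _ _ hprev0 hprevS]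
      omega

lemma xorTill_eq_fold (n : Int) (hn : ¬ n ≤ 0) :
    xorTill n = (PySem.List.pyRange 1 32 1).foldl (stepA (n + 1))
      (if PySem.Int.band (PySem.Int.truncdiv (n + 1) 2) 1 ≠ 0 then 1 else 0) := by
  simp only [xorTill]
  rw [if_neg hn]
  rfl

-- ===== VERDICT (by name: the statement is the Claim_ definition above) =====
theorem xorTill_spec : Claim_equal_xorTill := by
  intro n hDom
  unfold Spec_xorTill
  have hdom : -2147483648 ≤ n ∧ n ≤ 2147483648 := by
    have := of_decide_eq_true hDom
    exact this
  by_cases hn : n ≤ 0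
  · simp [xorTill, xorTill_alt, hn]
  · have hn1 : 0 < n := by omega
    have hband : PySem.Int.band (PySem.Int.truncdiv (n + 1) 2) 1 = ((n + 1) / 2) % 2 := by
      show PySem.Int.band ((n + 1).tdiv 2) 1 = _
      rw [Int.tdiv_eq_ediv_of_nonneg (by omega), PySem.Int.band_one,
        PySem.Int.mod_eq_emod_of_pos (by norm_num : (0:Int) < 2)]
    rw [xorTill_eq_fold n hn, hband]
    have h32 : (32 : Int) = 1 + ((31 : Nat) : Int) := by norm_num
    have halt : xorTill_alt n = (if n % 4 = 0 then n else if n % 4 = 1 then 1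
        else if n % 4 = 2 then n + 1 else 0) := by
      simp only [xorTill_alt, if_neg hn,
        PySem.Int.mod_eq_emod_of_pos (by norm_num : (0:Int) < 4)]
    set a0 : Int := if ((n + 1) / 2) % 2 ≠ 0 then (1 : Int) else 0 with ha0
    have ha00 : 0 ≤ a0 := by rw [ha0]; split_ifs <;> norm_num
    have ha01 : a0 ≤ 1 := by rw [ha0]; split_ifs <;> norm_num
    by_cases hm : (n + 1) % 2 = 0
    · rw [h32, fold_even (n + 1) a0 hm 31, halt, ha0]
      split_ifs <;> omega
    · have hm1 : (n + 1) % 2 = 1 := by omega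
      rw [h32, fold_odd (n + 1) a0 hm1 ha00 ha01 31, halt]
      have hpow : (2 : Int) ^ (31 + 1) = 4294967296 := by norm_num
      have hmod : (n + 1) % (4294967296 : Int) = n + 1 :=
        Int.emod_eq_of_lt (by omega) (by omega)
      rw [hpow, hmod, ha0]
      split_ifs <;> omega
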